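-- pv_equiv track=rewrite | github.com/tzing/bollard | bollard/image/ls.py | explode_dict
-- ===== SOURCE A (Python) =====
-- import itertools
--
-- def explode_dict(compressed_dict: list[dict]) -> list[dict[str, str]]:
--     output = []
--     for data in compressed_dict:
--         # categorize
--         col_unique = {}
--         col_zipped = {}
--         for c, v in data.items():
--             if not v:
--                 col_unique[c] = None
--             elif len(v) == 1:
--                 (col_unique[c],) = v
--             else:
--                 col_zipped[c] = v
--
--         # explode
--         if col_zipped:
--             for fv in itertools.zip_longest(*col_zipped.values()):
--                 d = col_unique.copy()
--                 for c, v in zip(col_zipped, fv):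
--                     d[c] = v
--                 output.append(d)
--         else:
--             output.append(col_unique)
--
--     return output
-- ===== SOURCE B (Python) =====
-- def explode_dict(compressed_dict: list[dict]) -> list[dict[str, str]]:
--     output = []
--     for data in compressed_dict:
--         # row count: length of the longest multi-valued column, else 1
--         n = 1
--         for v in data.values():
--             if len(v) > 1 and len(v) > n:
--                 n = len(v)
--         # preallocate the rows, then fill them COLUMN-major:
--         # singleton/empty columns into every row, then multi columns cell by cell
--         rows = [{} for _ in range(n)]
--         for c, v in data.items():
--             if len(v) <= 1:
--                 val = v[0] if v else None
--                 for row in rows: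
--                     row[c] = val
--         for c, v in data.items():
--             if len(v) > 1:
--                 for i, row in enumerate(rows):
--                     row[c] = v[i] if i < len(v) else None
--         output.extend(rows)
--     return output
-- ===== Notes on version B (the rewrite author's own statement) =====
-- stated objective: alternative
-- what changed: Inverts the loop nesting: instead of A's categorize-into-unique/zipped dicts followed by row-major construction with itertools.zip_longest, B preallocates the n row dicts up front and fills them column-major in two passes over the columns (singleton/empty columns written into every row, then multi-valued columns cell by cell with enumerate), with no intermediate category dicts and no transposition.
import Mathlib
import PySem

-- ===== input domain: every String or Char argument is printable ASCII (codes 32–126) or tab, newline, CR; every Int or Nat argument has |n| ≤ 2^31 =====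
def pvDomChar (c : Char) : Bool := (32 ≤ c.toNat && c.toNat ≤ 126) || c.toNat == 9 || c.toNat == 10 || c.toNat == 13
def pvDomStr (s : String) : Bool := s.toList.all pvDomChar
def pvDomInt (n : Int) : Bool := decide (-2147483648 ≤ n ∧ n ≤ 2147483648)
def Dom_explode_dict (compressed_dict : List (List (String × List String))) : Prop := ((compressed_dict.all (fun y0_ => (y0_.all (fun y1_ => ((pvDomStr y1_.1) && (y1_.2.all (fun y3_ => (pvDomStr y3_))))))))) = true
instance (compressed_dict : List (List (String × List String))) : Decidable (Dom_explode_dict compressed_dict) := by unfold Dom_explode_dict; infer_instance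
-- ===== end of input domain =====

-- B inverts the loop nesting: instead of A's categorize-into-dicts + zip_longest row-major
-- construction, B preallocates the n row dicts and fills them column-major in two passes
-- (objective: alternative decomposition, same cost).
-- Each inner association list stands for a Python dict and is canonicalized by Dict.ofList in both
-- ports (Python duplicates cannot reach the function; dict(pairs) keeps first position, last value).

-- ===== PORT A =====
-- hand port of itertools.zip_longest(*cols, fillvalue=None): exact — row i holds cols[j][i], none past a column's end
def pyZipLongest (cols : List (List String)) : List (List (Option String)) :=
  (List.range (cols.foldl (fun m v => max m v.length) 0)).map (fun i => cols.map (fun v => v[i]?))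

-- the body of A's categorize loop ("if not v / elif len(v) == 1 / else")
def catStep (s : PySem.Dict String (Option String) × PySem.Dict String (List String))
    (cv : String × List String) :
    PySem.Dict String (Option String) × PySem.Dict String (List String) :=
  if cv.2 = [] then (s.1.insert cv.1 none, s.2)
  else if cv.2.length = 1 then (s.1.insert cv.1 cv.2[0]?, s.2)
  else (s.1, s.2.insert cv.1 cv.2)

-- A's loop body for one 'data' dict
def explodeOneA (output : List (List (String × Option String))) (data : List (String × List String)) :
    List (List (String × Option String)) :=
  let s := (PySem.Dict.ofList data).items.foldl catStep (PySem.Dict.empty, PySem.Dict.empty)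
  if s.2.items ≠ [] then
    (pyZipLongest s.2.values).foldl (fun output fv =>
      output ++ [((s.2.keys.zip fv).foldl
        (fun (d : PySem.Dict String (Option String)) p => d.insert p.1 p.2) s.1).items]) output
  else output ++ [s.1.items]

def explode_dict (compressed_dict : List (List (String × List String))) : List (List (String × Option String)) :=
  compressed_dict.foldl explodeOneA []

-- ===== PORT B =====
-- 'for i, row in enumerate(rows): row[c] = v[i] if i < len(v) else None', transcribed structurally
def fillMRow (c : String) (v : List String) :
    List (PySem.Dict String (Option String)) → Nat → List (PySem.Dict String (Option String))
  | [], _ => []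
  | r :: rs, i => r.insert c v[i]? :: fillMRow c v rs (i + 1)

-- B's loop body for one 'data' dict: preallocate n rows, fill column-major in two passes
def explodeOneB (output : List (List (String × Option String))) (data : List (String × List String)) :
    List (List (String × Option String)) :=
  let items := (PySem.Dict.ofList data).items
  let n := items.foldl (fun n cv => if 1 < cv.2.length ∧ n < cv.2.length then cv.2.length else n) 1
  let rows0 := (List.range n).map (fun _ => (PySem.Dict.empty : PySem.Dict String (Option String)))
  let rows1 := items.foldl (fun rows cv =>
    if cv.2.length ≤ 1 then rows.map (fun r => r.insert cv.1 cv.2[0]?) else rows) rows0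
  let rows2 := items.foldl (fun rows cv =>
    if 1 < cv.2.length then fillMRow cv.1 cv.2 rows 0 else rows) rows1
  output ++ rows2.map (fun r => r.items)

def explode_dict_alt (compressed_dict : List (List (String × List String))) : List (List (String × Option String)) :=
  compressed_dict.foldl explodeOneB []

-- ===== PRECONDITION & SPEC =====
def Spec_explode_dict (compressed_dict : List (List (String × List String))) (out : List (List (String × Option String))) : Prop := out = explode_dict_alt compressed_dict
instance (compressed_dict : List (List (String × List String))) (out : List (List (String × Option String))) : Decidable (Spec_explode_dict compressed_dict out) := by unfold Spec_explode_dict; infer_instance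

-- ===== CLAIM (what is proved, stated in full; the proofs are below) =====
def Claim_equal_explode_dict : Prop := ∀ (compressed_dict : List (List (String × List String))), Dom_explode_dict compressed_dict → Spec_explode_dict compressed_dict (explode_dict compressed_dict)

-- ===== LEMMAS AND PROOFS =====

theorem catStep_foldl (l : List (String × List String))
    (d1 : PySem.Dict String (Option String)) (d2 : PySem.Dict String (List String))
    (h1 : ∀ p ∈ l, d1.contains p.1 = false) (h2 : ∀ p ∈ l, d2.contains p.1 = false)
    (hnd : (l.map Prod.fst).Nodup) :
    (l.foldl catStep (d1, d2)).1.items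
      = d1.items ++ (l.filter (fun cv => decide (cv.2.length ≤ 1))).map (fun cv => (cv.1, cv.2[0]?))
    ∧ (l.foldl catStep (d1, d2)).2.items
      = d2.items ++ l.filter (fun cv => decide (1 < cv.2.length)) := by
  induction l generalizing d1 d2 with
  | nil => simp
  | cons x t ih =>
    simp only [List.map_cons, List.nodup_cons, List.mem_map] at hnd
    obtain ⟨hx, hndt⟩ := hnd
    have hne : ∀ p ∈ t, p.1 ≠ x.1 := fun p hp heq => hx ⟨p, hp, heq⟩
    have h1t : ∀ p ∈ t, d1.contains p.1 = false := fun p hp => h1 p (by simp [hp])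
    have h2t : ∀ p ∈ t, d2.contains p.1 = false := fun p hp => h2 p (by simp [hp])
    simp only [List.foldl_cons, List.filter_cons]
    by_cases hnil : x.2 = []
    · have hlen : decide (x.2.length ≤ 1) = true := by simp [hnil]
      have hlen2 : decide (1 < x.2.length) = false := by simp [hnil]
      rw [catStep, if_pos hnil]
      have := ih (d1.insert x.1 none) d2
        (fun p hp => by rw [PySem.Dict.contains_insert]; simp [hne p hp, h1t p hp]) h2t hndt
      rw [this.1, this.2, PySem.Dict.items_insert_of_not_contains d1 none (h1 x (by simp))]
      simp [hnil]
    · by_cases h1len : x.2.length = 1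
      · have hlen : decide (x.2.length ≤ 1) = true := by simp [h1len]
        have hlen2 : decide (1 < x.2.length) = false := by simp [h1len]
        rw [catStep, if_neg hnil, if_pos h1len]
        have := ih (d1.insert x.1 x.2[0]?) d2
          (fun p hp => by rw [PySem.Dict.contains_insert]; simp [hne p hp, h1t p hp]) h2t hndt
        rw [this.1, this.2, PySem.Dict.items_insert_of_not_contains d1 _ (h1 x (by simp))]
        simp [hlen, hlen2]
      · have hgt : 1 < x.2.length := by
          have : x.2.length ≠ 0 := by simpa using hnil
          omega
        have hlen : decide (x.2.length ≤ 1) = false := by simp; omega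
        have hlen2 : decide (1 < x.2.length) = true := by simpa using hgt
        rw [catStep, if_neg hnil, if_neg h1len]
        have := ih d1 (d2.insert x.1 x.2) h1t
          (fun p hp => by rw [PySem.Dict.contains_insert]; simp [hne p hp, h2t p hp]) hndt
        rw [this.1, this.2, PySem.Dict.items_insert_of_not_contains d2 _ (h2 x (by simp))]
        simp [hlen, hlen2]

theorem foldl_max_init {α : Type} (l : List α) (f : α → Nat) (a : Nat) :
    l.foldl (fun m x => max m (f x)) a = max a (l.foldl (fun m x => max m (f x)) 0) := by
  induction l generalizing a with
  | nil => simp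
  | cons x t ih =>
    simp only [List.foldl_cons]
    rw [ih (max a (f x)), ih (max 0 (f x))]
    omega

theorem foldl_if_filter (l : List (String × List String)) (a : Nat) :
    l.foldl (fun n cv => if 1 < cv.2.length ∧ n < cv.2.length then cv.2.length else n) a
      = (l.filter (fun cv => decide (1 < cv.2.length))).foldl (fun n cv => max n cv.2.length) a := by
  induction l generalizing a with
  | nil => rfl
  | cons x t ih =>
    simp only [List.foldl_cons, List.filter_cons]
    by_cases h : 1 < x.2.length
    · have hstep : (if 1 < x.2.length ∧ a < x.2.length then x.2.length else a) = max a x.2.length := by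
        split_ifs with h' <;> omega
      rw [hstep, ih]
      simp [h, List.foldl_cons]
    · have hstep : (if 1 < x.2.length ∧ a < x.2.length then x.2.length else a) = a := by
        split_ifs with h' <;> [exact absurd h'.1 h; rfl]
      rw [hstep, ih]
      simp [h]

theorem not_le_decide (x : String × List String) :
    (!decide (x.2.length ≤ 1)) = decide (1 < x.2.length) := by
  by_cases h : x.2.length ≤ 1
  · simp [h]
  · simp [h]
    omega

-- B side: the inner enumerate loop over rows presented as (range' s n).map g
theorem fillMRow_range (c : String) (v : List String) (n s : Nat)
    (g : Nat → PySem.Dict String (Option String)) :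
    fillMRow c v ((List.range' s n 1).map g) s
      = (List.range' s n 1).map (fun j => (g j).insert c v[j]?) := by
  induction n generalizing s with
  | zero => rfl
  | succ m ih =>
    rw [List.range'_succ]
    simp only [List.map_cons, fillMRow]
    rw [ih (s + 1)]

-- B side: the singleton-column fill pass
theorem fillS_fold (l : List (String × List String)) (n : Nat)
    (g : Nat → PySem.Dict String (Option String)) :
    l.foldl (fun rows cv =>
        if cv.2.length ≤ 1 then rows.map (fun r => r.insert cv.1 cv.2[0]?) else rows)
      ((List.range' 0 n 1).map g)
      = (List.range' 0 n 1).map (fun j =>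
          (l.filter (fun cv => decide (cv.2.length ≤ 1))).foldl
            (fun r cv => r.insert cv.1 cv.2[0]?) (g j)) := by
  induction l generalizing g with
  | nil => simp
  | cons x t ih =>
    simp only [List.foldl_cons, List.filter_cons]
    by_cases h : x.2.length ≤ 1
    · simp only [h, decide_true, if_true, List.map_map]
      rw [show ((fun (r : PySem.Dict String (Option String)) => r.insert x.1 x.2[0]?) ∘ g)
            = (fun j => (g j).insert x.1 x.2[0]?) from rfl]
      rw [ih (fun j => (g j).insert x.1 x.2[0]?)]
      simp [List.foldl_cons]
    · simp only [h, decide_false, if_false]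
      rw [ih g]
      simp

-- B side: the multi-column fill pass
theorem fillM_fold (l : List (String × List String)) (n : Nat)
    (g : Nat → PySem.Dict String (Option String)) :
    l.foldl (fun rows cv =>
        if 1 < cv.2.length then fillMRow cv.1 cv.2 rows 0 else rows)
      ((List.range' 0 n 1).map g)
      = (List.range' 0 n 1).map (fun j =>
          (l.filter (fun cv => decide (1 < cv.2.length))).foldl
            (fun r cv => r.insert cv.1 cv.2[j]?) (g j)) := by
  induction l generalizing g with
  | nil => simp
  | cons x t ih =>
    simp only [List.foldl_cons, List.filter_cons]
    by_cases h : 1 < x.2.length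
    · simp only [h, decide_true, if_true]
      rw [fillMRow_range x.1 x.2 n 0 g, ih (fun j => (g j).insert x.1 x.2[j]?)]
      simp
    · simp only [h, decide_false, if_false]
      rw [ih g]
      simp

theorem perData (output : List (List (String × Option String))) (data : List (String × List String)) :
    explodeOneA output data = explodeOneB output data := by
  have hnd : (((PySem.Dict.ofList data).items).map Prod.fst).Nodup := by
    have := PySem.Dict.nodup_keys_ofList (ν := List String) data
    simpa [PySem.Dict.keys] using this
  set L := (PySem.Dict.ofList data).items with hL
  set U := L.filter (fun cv => decide (cv.2.length ≤ 1)) with hU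
  set F := L.filter (fun cv => decide (1 < cv.2.length)) with hF
  -- the partition U ++ F is a permutation of L, so its fst-keys are nodup
  have hperm : (U ++ F).Perm L := by
    have := List.filter_append_perm (fun cv => decide (cv.2.length ≤ 1)) L
    rwa [List.filter_congr (fun x _ => not_le_decide x)] at this
  have hndUF : ((U ++ F).map Prod.fst).Nodup := ((hperm.map Prod.fst).nodup_iff).mpr hnd
  have hndU : (U.map Prod.fst).Nodup := by
    simp only [List.map_append, List.nodup_append] at hndUF; exact hndUF.1
  have hndF : (F.map Prod.fst).Nodup := by
    simp only [List.map_append, List.nodup_append] at hndUF; exact hndUF.2.1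
  have hdisj : ∀ x ∈ F.map Prod.fst, x ∉ U.map Prod.fst := fun x hx hx' =>
    (List.disjoint_of_nodup_append (by simpa [List.map_append] using hndUF)) hx' hx
  -- A's categorize pass
  have hcat := catStep_foldl L PySem.Dict.empty PySem.Dict.empty
    (fun p _ => PySem.Dict.contains_empty _) (fun p _ => PySem.Dict.contains_empty _) hnd
  set s := L.foldl catStep (PySem.Dict.empty, PySem.Dict.empty) with hs
  have hs1 : s.1.items = U.map (fun cv => (cv.1, cv.2[0]?)) := by simpa using hcat.1
  have hs2 : s.2.items = F := by simpa using hcat.2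
  have hs1keys : s.1.keys = U.map Prod.fst := by
    show s.1.items.map Prod.fst = _
    rw [hs1]; simp [List.map_map, Function.comp]
  -- the common per-row dict both sides build, described by its items
  have hrowU : ∀ (d : PySem.Dict String (Option String)), d.items = U.map (fun cv => (cv.1, cv.2[0]?)) →
      ∀ i : Nat, ((F.map (fun cv => (cv.1, (cv.2[i]? : Option String)))).foldl
        (fun (d : PySem.Dict String (Option String)) p => d.insert p.1 p.2) d).items
      = U.map (fun cv => (cv.1, cv.2[0]?)) ++ F.map (fun cv => (cv.1, cv.2[i]?)) := by
    intro d hd i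
    have hdkeys : d.keys = U.map Prod.fst := by
      show d.items.map Prod.fst = _
      rw [hd]; simp [List.map_map, Function.comp]
    have := PySem.Dict.items_foldl_insert_fresh (F.map (fun cv => (cv.1, cv.2[i]?)))
      Prod.fst Prod.snd d
      (fun a ha => by
        rw [PySem.Dict.contains_eq_decide_mem_keys, hdkeys]
        have : a.1 ∈ F.map Prod.fst := by
          simp only [List.mem_map] at ha ⊢
          obtain ⟨cv, hcv, rfl⟩ := ha
          exact ⟨cv, hcv, rfl⟩
        simp [hdisj a.1 this])
      (by simpa [List.map_map, Function.comp] using hndF)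
    rw [this, hd]
    simp [Function.comp]
  -- A's per-row dict
  have hrowA : ∀ i : Nat,
      ((s.2.keys.zip (s.2.values.map (fun v => v[i]?))).foldl
        (fun (d : PySem.Dict String (Option String)) p => d.insert p.1 p.2) s.1).items
      = U.map (fun cv => (cv.1, cv.2[0]?)) ++ F.map (fun cv => (cv.1, cv.2[i]?)) := by
    intro i
    have hkeys : s.2.keys = F.map Prod.fst := by
      show s.2.items.map Prod.fst = _; rw [hs2]
    have hvals : s.2.values = F.map Prod.snd := by
      show s.2.items.map Prod.snd = _; rw [hs2]
    have hzip : s.2.keys.zip (s.2.values.map (fun v => v[i]?))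
        = F.map (fun cv => (cv.1, cv.2[i]?)) := by
      rw [hkeys, hvals, List.map_map]
      exact List.zip_map'
    rw [hzip]
    exact hrowU s.1 hs1 i
  -- B's per-row dict, built by inserting U then F into the empty dict
  have hrowBU : ∀ j : Nat, (U.foldl (fun (r : PySem.Dict String (Option String)) cv =>
        r.insert cv.1 cv.2[0]?) PySem.Dict.empty).items
      = U.map (fun cv => (cv.1, cv.2[0]?)) := by
    intro _
    have := PySem.Dict.items_foldl_insert_fresh U Prod.fst (fun cv => cv.2[0]?) PySem.Dict.empty
      (fun a _ => PySem.Dict.contains_empty _) hndU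
    simpa using this
  have hrowB : ∀ j : Nat, (F.foldl (fun (r : PySem.Dict String (Option String)) cv =>
        r.insert cv.1 cv.2[j]?)
        (U.foldl (fun (r : PySem.Dict String (Option String)) cv => r.insert cv.1 cv.2[0]?)
          PySem.Dict.empty)).items
      = U.map (fun cv => (cv.1, cv.2[0]?)) ++ F.map (fun cv => (cv.1, cv.2[j]?)) := by
    intro j
    have := hrowU _ (hrowBU j) j
    rw [← this]
    congr 1
    rw [List.foldl_map]
  -- B's fills written through range'
  have hBrows : (L.foldl (fun rows cv =>
        if 1 < cv.2.length then fillMRow cv.1 cv.2 rows 0 else rows)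
      (L.foldl (fun rows cv =>
        if cv.2.length ≤ 1 then rows.map (fun r => r.insert cv.1 cv.2[0]?) else rows)
      ((List.range (L.foldl (fun n cv => if 1 < cv.2.length ∧ n < cv.2.length then cv.2.length else n) 1)).map
        (fun _ => (PySem.Dict.empty : PySem.Dict String (Option String)))))).map (fun r => r.items)
      = (List.range (L.foldl (fun n cv => if 1 < cv.2.length ∧ n < cv.2.length then cv.2.length else n) 1)).map
        (fun j => U.map (fun cv => (cv.1, cv.2[0]?)) ++ F.map (fun cv => (cv.1, cv.2[j]?))) := by
    set n := L.foldl (fun n cv => if 1 < cv.2.length ∧ n < cv.2.length then cv.2.length else n) 1 with hn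
    rw [List.range_eq_range']
    rw [fillS_fold L n (fun _ => PySem.Dict.empty), fillM_fold L n _, List.map_map]
    apply List.map_congr_left
    intro j _
    simp only [Function.comp]
    rw [← hU, ← hF, hrowB j]
  -- the row count agrees with A's zip_longest length when F ≠ []
  have hncount : L.foldl (fun n cv => if 1 < cv.2.length ∧ n < cv.2.length then cv.2.length else n) 1
      = max 1 (F.foldl (fun n cv => max n cv.2.length) 0) := by
    rw [foldl_if_filter, ← hF, foldl_max_init]
  by_cases hFe : F = []
  · -- no multi column: one row each
    rw [explodeOneA, explodeOneB]
    simp only [← hL, ← hs]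
    rw [if_neg (by simp [hs2, hFe])]
    rw [hBrows, hncount, hFe]
    simp only [List.foldl_nil]
    rw [show max 1 0 = 1 from rfl, show List.range 1 = [0] from rfl]
    simp [hs1]
  · rw [explodeOneA, explodeOneB]
    simp only [← hL, ← hs]
    rw [if_pos (by simp [hs2, hFe])]
    rw [hBrows, hncount]
    -- max over F is ≥ 2, so the two row counts agree
    have hM : 2 ≤ F.foldl (fun n cv => max n cv.2.length) 0 := by
      obtain ⟨y, hy⟩ := List.exists_mem_of_ne_nil F hFe
      have h2y : 2 ≤ y.2.length := by
        have := List.of_mem_filter (hF ▸ hy)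
        simpa using this
      have hle : y.2.length ≤ (F.map (fun cv => cv.2.length)).foldl max 0 :=
        (PySem.List.le_foldl_max _ 0).2 _ (List.mem_map_of_mem hy)
      rw [List.foldl_map] at hle
      omega
    have hvals : s.2.values = F.map Prod.snd := by
      show s.2.items.map Prod.snd = _; rw [hs2]
    have hm : (s.2.values).foldl (fun m v => max m v.length) 0
        = F.foldl (fun n cv => max n cv.2.length) 0 := by
      rw [hvals, List.foldl_map]
    rw [Nat.max_eq_right (by omega)]
    rw [pyZipLongest, hm]
    rw [PySem.List.foldl_append_singleton_eq_map]
    rw [List.map_map]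
    congr 1
    apply List.map_congr_left
    intro i _
    simp only [Function.comp]
    rw [hrowA i]

-- ===== VERDICT (by name: the statement is the Claim_ definition above) =====
theorem explode_dict_spec : Claim_equal_explode_dict := by
  intro cd _
  unfold Spec_explode_dict explode_dict explode_dict_alt
  exact PySem.List.foldl_congr_mem cd _ _ [] (fun acc x _ => perData acc x)
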